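-- pv_equiv track=rewrite | github.com/grapheneaffiliate/h4-polytopic-attention | solve_arc_b24.py | solve_f9012d9b
-- ===== SOURCE A (Python) =====
-- def solve_f9012d9b(grid):
--     """Extract the 'missing' corner pattern from a tiled grid."""
--     R, C = len(grid), len(grid[0])
--     # The grid has a repeating 2x2 or similar tile pattern with a section of 0s
--     # The 0 section indicates the missing part, output is the missing part's pattern
--
--     # Find 0 cells
--     zeros = [(r,c) for r in range(R) for c in range(C) if grid[r][c]==0]
--     if not zeros: return grid
--
--     min_r = min(r for r,c in zeros)
--     max_r = max(r for r,c in zeros)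
--     min_c = min(c for r,c in zeros)
--     max_c = max(c for r,c in zeros)
--
--     h = max_r - min_r + 1
--     w = max_c - min_c + 1
--
--     # Find the tile pattern from non-zero area
--     # The tile repeats. Find the period.
--     # Look at row 0 to find column period
--
--     # Extract what should be in the 0 region by finding the tile period
--     # and filling in from the existing pattern
--
--     # Find tile size by looking at the pattern
--     # Try different periods
--     for period_r in range(1, R):
--         for period_c in range(1, C):
--             valid = True
--             for r in range(R):
--                 for c in range(C):
--                     if grid[r][c] != 0:
--                         # Check if this matches the periodic pattern
--                         ref_r = r % period_r
--                         ref_c = c % period_c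
--                         # Find the reference cell
--                         found = False
--                         for rr in range(R):
--                             for cc in range(C):
--                                 if rr % period_r == ref_r and cc % period_c == ref_c and grid[rr][cc] != 0:
--                                     if grid[rr][cc] != grid[r][c]:
--                                         valid = False
--                                     found = True
--                                     break
--                             if found: break
--                     if not valid: break
--                 if not valid: break
--
--             if valid:
--                 # Found the period. Now fill in the missing region.
--                 # Build the tile
--                 tile = [[0]*period_c for _ in range(period_r)]
--                 for r in range(R):
--                     for c in range(C):
--                         if grid[r][c] != 0:
--                             tile[r % period_r][c % period_c] = grid[r][c]
--
--                 out = [[0]*w for _ in range(h)]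
--                 for r in range(h):
--                     for c in range(w):
--                         out[r][c] = tile[(min_r+r) % period_r][(min_c+c) % period_c]
--                 return out
--
--     return [[0]*w for _ in range(h)]
-- ===== SOURCE B (Python) =====
-- def solve_f9012d9b(grid):
--     """Extract the 'missing' corner pattern from a tiled grid."""
--     R, C = len(grid), len(grid[0])
--     # one scan: bounding box of the zero region + the nonzero cells as triples
--     min_r = None
--     max_r = 0
--     min_c = None
--     max_c = 0
--     nz = []
--     for r in range(R):
--         row = grid[r]
--         for c in range(C):
--             v = row[c]
--             if v == 0:
--                 if min_r is None:
--                     min_r = r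
--                 max_r = r
--                 min_c = c if min_c is None else (c if c < min_c else min_c)
--                 max_c = c if max_c < c else max_c
--             else:
--                 nz.append((r, c, v))
--     if min_r is None:
--         return grid
--     h = max_r - min_r + 1
--     w = max_c - min_c + 1
--     for pr in range(1, R):
--         for pc in range(1, C):
--             # first nonzero value of each residue class, over nonzero cells only
--             first = {}
--             ok = True
--             for (r, c, v) in nz:
--                 k = (r % pr, c % pc)
--                 u = first.get(k)
--                 if u is None:
--                     first[k] = v
--                 elif u != v:
--                     ok = False
--                     break
--             if ok:
--                 return [[first.get(((min_r + r) % pr, (min_c + c) % pc), 0)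
--                          for c in range(w)] for r in range(h)]
--     return [[0] * w for _ in range(h)]
-- ===== Notes on version B (the rewrite author's own statement) =====
-- stated objective: alternative
-- what changed: B replaces A's per-cell full-grid reference search (a quadruple nested scan per candidate period) by a single grid scan that records the zero bounding box with running min/max and collects the nonzero cells, then checks each candidate period in one pass over the nonzero cells with a dictionary of first values per residue class, reading the output straight from that dictionary.
import Mathlib
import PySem

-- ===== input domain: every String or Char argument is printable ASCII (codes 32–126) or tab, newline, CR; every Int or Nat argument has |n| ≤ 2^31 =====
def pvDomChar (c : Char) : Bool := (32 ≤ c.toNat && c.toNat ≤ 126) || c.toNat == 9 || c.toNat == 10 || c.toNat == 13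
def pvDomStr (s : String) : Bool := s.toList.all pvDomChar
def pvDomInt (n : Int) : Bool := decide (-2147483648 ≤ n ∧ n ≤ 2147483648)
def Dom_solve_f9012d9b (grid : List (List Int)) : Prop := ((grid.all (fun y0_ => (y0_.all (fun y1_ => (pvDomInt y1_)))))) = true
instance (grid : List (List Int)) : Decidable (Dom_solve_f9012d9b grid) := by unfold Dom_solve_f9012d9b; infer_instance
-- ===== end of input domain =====

-- B scans the grid once (running zero bounding box + list of nonzero cells) and checks
-- each candidate period on the nonzero cells only, via a first-value-per-residue-class
-- dictionary, instead of A's full-grid reference search per cell (objective: alternative).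

-- ===== PORT A =====
-- grid[r][c] (indices are in range under Pre_, so a defaulted lookup is exact)
def pvAt (grid : List (List Int)) (r c : Nat) : Int := (grid.getD r []).getD c 0

-- the cell list in Python's row-major scan order
def pvCells (R C : Nat) : List (Nat × Nat) :=
  (List.range R).flatMap (fun r => (List.range C).map (fun c => (r, c)))

-- the candidate periods (pr, pc) in Python's loop order
def pvPairs (R C : Nat) : List (Nat × Nat) :=
  (List.range' 1 (R - 1)).flatMap (fun pr => (List.range' 1 (C - 1)).map (fun pc => (pr, pc)))

-- inner search: first nonzero cell with the given residues (Python's rr/cc loops with break)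
def pvFindRefA (grid : List (List Int)) (R C pr pc : Nat) (k : Nat × Nat) : Option (Nat × Nat) :=
  (pvCells R C).find? (fun q => ((q.1 % pr, q.2 % pc) == k) && (pvAt grid q.1 q.2 != 0))

-- the valid flag with its breaks = all cells pass
def pvValidA (grid : List (List Int)) (R C pr pc : Nat) : Bool :=
  (pvCells R C).all (fun p =>
    (pvAt grid p.1 p.2 == 0) ||
    (match pvFindRefA grid R C pr pc (p.1 % pr, p.2 % pc) with
     | some q => pvAt grid q.1 q.2 == pvAt grid p.1 p.2
     | none => true))

-- tile[r%pr][c%pc] = grid[r][c] over all nonzero cells (last write wins), 0 elsewhere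
def pvTileA (grid : List (List Int)) (R C pr pc : Nat) : (Nat × Nat) → Int :=
  (pvCells R C).foldl
    (fun t p => if pvAt grid p.1 p.2 ≠ 0
                then Function.update t (p.1 % pr, p.2 % pc) (pvAt grid p.1 p.2) else t)
    (fun _ => 0)

def pvTryA (grid : List (List Int)) (R C minr minc h w pr pc : Nat) : Option (List (List Int)) :=
  if pvValidA grid R C pr pc then
    some ((List.range h).map (fun r => (List.range w).map (fun c =>
      pvTileA grid R C pr pc ((minr + r) % pr, (minc + c) % pc))))
  else none

def solve_f9012d9b (grid : List (List Int)) : List (List Int) :=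
  let R := grid.length
  let C := (grid.getD 0 []).length
  let zeros := (pvCells R C).filter (fun p => pvAt grid p.1 p.2 == 0)
  if zeros.isEmpty then grid else
  let minr := (PySem.List.min? (zeros.map Prod.fst) (fun x => x)).getD 0
  let maxr := (PySem.List.max? (zeros.map Prod.fst) (fun x => x)).getD 0
  let minc := (PySem.List.min? (zeros.map Prod.snd) (fun x => x)).getD 0
  let maxc := (PySem.List.max? (zeros.map Prod.snd) (fun x => x)).getD 0
  let h := maxr - minr + 1
  let w := maxc - minc + 1
  match (pvPairs R C).findSome? (fun pp => pvTryA grid R C minr minc h w pp.1 pp.2) with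
  | some out => out
  | none => (List.range h).map (fun _ => (List.range w).map (fun _ => (0 : Int)))

-- ===== PORT B =====
-- one cell of B's single scan: update the running zero bounding box
-- (min_r/max_r/min_c/max_c, None as Option) or append the nonzero triple
def pvStepB (r c : Nat) (v : Int)
    (s : Option Nat × Nat × Option Nat × Nat × List (Nat × Nat × Int)) :
    Option Nat × Nat × Option Nat × Nat × List (Nat × Nat × Int) :=
  match s with
  | (mr, Mr, mc, Mc, nz) =>
    if v = 0 then
      ((if mr.isNone then some r else mr), r,
       some (match mc with | none => c | some m => if c < m then c else m),
       (if Mc < c then c else Mc), nz)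
    else (mr, Mr, mc, Mc, nz ++ [(r, c, v)])

-- Python's  for r in range(R): row = grid[r]; for c in range(C): v = row[c]; …
def pvScanB (grid : List (List Int)) (R C : Nat) :
    Option Nat × Nat × Option Nat × Nat × List (Nat × Nat × Int) :=
  (List.range R).foldl (fun s r =>
    let row := grid.getD r []
    (List.range C).foldl (fun s c => pvStepB r c (row.getD c 0) s) s)
    (none, 0, none, 0, [])

-- the dict pass over the nonzero triples, with its break (none = mismatch found)
def pvRunB (pr pc : Nat) : List (Nat × Nat × Int) → PySem.Dict (Nat × Nat) Int →
    Option (PySem.Dict (Nat × Nat) Int)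
  | [], first => some first
  | (r, c, v) :: t, first =>
    match first.get? (r % pr, c % pc) with
    | none => pvRunB pr pc t (first.insert (r % pr, c % pc) v)
    | some u => if u ≠ v then none else pvRunB pr pc t first

-- Python's first.get(k, 0) is Dict.getD
def pvFillB (first : PySem.Dict (Nat × Nat) Int) (minr minc h w pr pc : Nat) : List (List Int) :=
  (List.range h).map (fun r => (List.range w).map (fun c =>
    first.getD ((minr + r) % pr, (minc + c) % pc) 0))

-- the inner  for pc in range(1, C)  loop
def pvLoopC (nz : List (Nat × Nat × Int)) (minr minc h w pr : Nat) :
    List Nat → Option (List (List Int))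
  | [] => none
  | pc :: rest =>
    match pvRunB pr pc nz PySem.Dict.empty with
    | some first => some (pvFillB first minr minc h w pr pc)
    | none => pvLoopC nz minr minc h w pr rest

-- the outer  for pr in range(1, R)  loop
def pvLoopR (nz : List (Nat × Nat × Int)) (minr minc h w C : Nat) :
    List Nat → Option (List (List Int))
  | [] => none
  | pr :: rest =>
    match pvLoopC nz minr minc h w pr (List.range' 1 (C - 1)) with
    | some out => some out
    | none => pvLoopR nz minr minc h w C rest

def solve_f9012d9b_alt (grid : List (List Int)) : List (List Int) :=
  let R := grid.length
  let C := (grid.getD 0 []).length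
  match pvScanB grid R C with
  | (none, _, _, _, _) => grid
  | (some minr, maxr, mc, maxc, nz) =>
    let minc := mc.getD 0
    let h := maxr - minr + 1
    let w := maxc - minc + 1
    match pvLoopR nz minr minc h w C (List.range' 1 (R - 1)) with
    | some out => out
    | none => (List.range h).map (fun _ => (List.range w).map (fun _ => (0 : Int)))

-- ===== PRECONDITION & SPEC =====
-- Pre_ excludes exactly the inputs where Python A raises IndexError: the empty grid
-- (grid[0]) and grids with a row shorter than row 0 (grid[r][c] for c < len(grid[0])).
def Pre_solve_f9012d9b (grid : List (List Int)) : Prop :=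
  grid ≠ [] ∧ ∀ row ∈ grid, (grid.headD []).length ≤ row.length
instance (grid : List (List Int)) : Decidable (Pre_solve_f9012d9b grid) := by
  unfold Pre_solve_f9012d9b; infer_instance

def pvWitness_solve_f9012d9b : List (List Int) := [[1, 0], [1, 1]]

def Spec_solve_f9012d9b (grid : List (List Int)) (out : List (List Int)) : Prop := out = solve_f9012d9b_alt grid
instance (grid : List (List Int)) (out : List (List Int)) : Decidable (Spec_solve_f9012d9b grid out) := by unfold Spec_solve_f9012d9b; infer_instance

-- ===== CLAIM (what is proved, stated in full; the proofs are below) =====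
def Claim_equal_solve_f9012d9b : Prop := ∀ (grid : List (List Int)), Dom_solve_f9012d9b grid → Pre_solve_f9012d9b grid → Spec_solve_f9012d9b grid (solve_f9012d9b grid)

-- ===== LEMMAS AND PROOFS =====

-- ghost: the nonzero triples of a cell list (B's nz)
def pvNz (grid : List (List Int)) (l : List (Nat × Nat)) : List (Nat × Nat × Int) :=
  l.filterMap (fun p => if pvAt grid p.1 p.2 = 0 then none
                        else some (p.1, p.2, pvAt grid p.1 p.2))

-- ghost (proof-only) two-phase view of the dict pass: the dict it builds …
def pvBuildB (grid : List (List Int)) (pr pc : Nat) (l : List (Nat × Nat))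
    (d : PySem.Dict (Nat × Nat) Int) : PySem.Dict (Nat × Nat) Int :=
  l.foldl (fun d p =>
    if pvAt grid p.1 p.2 != 0 && !(d.contains (p.1 % pr, p.2 % pc))
    then d.insert (p.1 % pr, p.2 % pc) (pvAt grid p.1 p.2) else d) d

-- … and the condition under which the pass survives to the end
def pvOkB (grid : List (List Int)) (pr pc : Nat) (l : List (Nat × Nat))
    (d : PySem.Dict (Nat × Nat) Int) : Bool :=
  l.all (fun p =>
    (pvAt grid p.1 p.2 == 0) ||
    ((pvBuildB grid pr pc l d).getD (p.1 % pr, p.2 % pc) 0 == pvAt grid p.1 p.2))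

-- ghost: the dict pass written over the cell list (zero cells skipped)
def pvGoB (grid : List (List Int)) (pr pc : Nat) :
    List (Nat × Nat) → PySem.Dict (Nat × Nat) Int → Option (PySem.Dict (Nat × Nat) Int)
  | [], d => some d
  | p :: t, d =>
    if pvAt grid p.1 p.2 != 0 then
      match d.get? (p.1 % pr, p.2 % pc) with
      | none => pvGoB grid pr pc t (d.insert (p.1 % pr, p.2 % pc) (pvAt grid p.1 p.2))
      | some u => if u != pvAt grid p.1 p.2 then none
                  else pvGoB grid pr pc t d
    else pvGoB grid pr pc t d

-- B's pass over the nonzero triples = the ghost pass over the cells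
theorem pvRunB_eq_pvGoB (grid : List (List Int)) (pr pc : Nat) (l : List (Nat × Nat))
    (d : PySem.Dict (Nat × Nat) Int) :
    pvRunB pr pc (pvNz grid l) d = pvGoB grid pr pc l d := by
  induction l generalizing d with
  | nil => simp [pvNz, pvRunB, pvGoB]
  | cons p t ih =>
    by_cases hv : pvAt grid p.1 p.2 = 0
    · simp only [pvNz, List.filterMap_cons, if_pos hv]
      rw [show pvGoB grid pr pc (p :: t) d = pvGoB grid pr pc t d by simp [pvGoB, hv]]
      exact ih d
    · rw [show pvNz grid (p :: t) = (p.1, p.2, pvAt grid p.1 p.2) :: pvNz grid t from by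
        simp [pvNz, hv]]
      rw [show pvRunB pr pc ((p.1, p.2, pvAt grid p.1 p.2) :: pvNz grid t) d
          = (match d.get? (p.1 % pr, p.2 % pc) with
             | none => pvRunB pr pc (pvNz grid t) (d.insert (p.1 % pr, p.2 % pc) (pvAt grid p.1 p.2))
             | some u => if u ≠ pvAt grid p.1 p.2 then none else pvRunB pr pc (pvNz grid t) d)
          from rfl]
      cases hget : d.get? (p.1 % pr, p.2 % pc) with
      | none =>
        rw [show pvGoB grid pr pc (p :: t) d
            = pvGoB grid pr pc t (d.insert (p.1 % pr, p.2 % pc) (pvAt grid p.1 p.2)) by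
          simp [pvGoB, hv, hget]]
        exact ih _
      | some u =>
        by_cases hu : u = pvAt grid p.1 p.2
        · rw [show pvGoB grid pr pc (p :: t) d = pvGoB grid pr pc t d by
            simp [pvGoB, hv, hget, hu]]
          subst hu
          simpa using ih d
        · rw [show pvGoB grid pr pc (p :: t) d = none by simp [pvGoB, hv, hget, hu]]
          simp [hu]

-- the dict-building fold never overwrites an existing key
theorem pvBuildB_get?_mono (grid : List (List Int)) (pr pc : Nat) (l : List (Nat × Nat))
    (d : PySem.Dict (Nat × Nat) Int) (x : Nat × Nat) (v : Int) (hx : d.get? x = some v) :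
    (pvBuildB grid pr pc l d).get? x = some v := by
  unfold pvBuildB
  induction l generalizing d with
  | nil => simpa using hx
  | cons p t ih =>
    simp only [List.foldl_cons]
    by_cases hb : (pvAt grid p.1 p.2 != 0 && !(d.contains (p.1 % pr, p.2 % pc))) = true
    · rw [if_pos hb]
      apply ih
      have hne : x ≠ (p.1 % pr, p.2 % pc) := by
        intro h
        have hc : d.contains (p.1 % pr, p.2 % pc) = false := by
          rcases Bool.and_eq_true_iff.mp hb with ⟨_, h2⟩
          simpa using h2
        subst h
        rw [(PySem.Dict.get?_eq_none_iff_contains d _).mpr hc] at hx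
        simp at hx
      rw [PySem.Dict.get?_insert, if_neg hne, hx]
    · rw [if_neg hb]; exact ih d hx

-- on absent keys the dict holds the FIRST nonzero cell of the class (A's inner search)
theorem pvBuildB_get?_none (grid : List (List Int)) (pr pc : Nat) (l : List (Nat × Nat))
    (d : PySem.Dict (Nat × Nat) Int) (x : Nat × Nat) (hx : d.get? x = none) :
    (pvBuildB grid pr pc l d).get? x
      = (l.find? (fun q => ((q.1 % pr, q.2 % pc) == x) && (pvAt grid q.1 q.2 != 0))).map
          (fun q => pvAt grid q.1 q.2) := by
  unfold pvBuildB
  induction l generalizing d with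
  | nil => simpa using hx
  | cons p t ih =>
    simp only [List.foldl_cons, List.find?_cons]
    by_cases hv : (pvAt grid p.1 p.2 != 0) = true
    · by_cases hc : d.contains (p.1 % pr, p.2 % pc) = true
      · have hne : ((p.1 % pr, p.2 % pc) == x) = false := by
          have : x ≠ (p.1 % pr, p.2 % pc) := by
            intro h
            subst h
            rw [(PySem.Dict.get?_eq_none_iff_contains d _).mp hx] at hc
            exact Bool.false_ne_true hc
          simpa using (Ne.symm this)
        simp only [hv, hc, Bool.not_true, Bool.and_false, hne, Bool.false_and]
        exact ih d hx
      · have hc' : d.contains (p.1 % pr, p.2 % pc) = false := by simpa using hc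
        simp only [hv, hc', Bool.not_false, Bool.and_true, if_true, Bool.and_true]
        by_cases hk : x = (p.1 % pr, p.2 % pc)
        · have : ((p.1 % pr, p.2 % pc) == x) = true := by simp [hk]
          rw [this]
          subst hk
          have := pvBuildB_get?_mono grid pr pc t
            (d.insert (p.1 % pr, p.2 % pc) (pvAt grid p.1 p.2)) _ _
            (PySem.Dict.get?_insert_self _ _ _)
          unfold pvBuildB at this
          exact this
        · have : ((p.1 % pr, p.2 % pc) == x) = false := by simpa using (Ne.symm hk)
          rw [this]
          rw [ih _ (by rw [PySem.Dict.get?_insert, if_neg hk]; exact hx)]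
    · have hv' : (pvAt grid p.1 p.2 != 0) = false := by simpa using hv
      simp only [hv', Bool.false_and, Bool.and_false]
      exact ih d hx

-- the ghost pass = build the first-occurrence dict, keep it iff every cell agrees
theorem pvGoB_eq (grid : List (List Int)) (pr pc : Nat) (l : List (Nat × Nat))
    (d : PySem.Dict (Nat × Nat) Int) :
    pvGoB grid pr pc l d
      = if pvOkB grid pr pc l d then some (pvBuildB grid pr pc l d) else none := by
  induction l generalizing d with
  | nil => simp [pvGoB, pvOkB, pvBuildB]
  | cons p t ih =>
    by_cases hv : (pvAt grid p.1 p.2 != 0) = true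
    · cases hget : d.get? (p.1 % pr, p.2 % pc) with
      | none =>
        have hc : d.contains (p.1 % pr, p.2 % pc) = false :=
          (PySem.Dict.get?_eq_none_iff_contains d _).mp hget
        have hbuild : pvBuildB grid pr pc (p :: t) d
            = pvBuildB grid pr pc t (d.insert (p.1 % pr, p.2 % pc) (pvAt grid p.1 p.2)) := by
          unfold pvBuildB
          simp only [List.foldl_cons, hv, hc, Bool.not_false, Bool.and_true, if_true]
        have hclause : ((pvBuildB grid pr pc (p :: t) d).getD (p.1 % pr, p.2 % pc) 0
            == pvAt grid p.1 p.2) = true := by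
          rw [hbuild, PySem.Dict.getD_eq_get?_getD,
            pvBuildB_get?_mono grid pr pc t _ _ _ (PySem.Dict.get?_insert_self _ _ _)]
          simp
        have hok : pvOkB grid pr pc (p :: t) d
            = pvOkB grid pr pc t (d.insert (p.1 % pr, p.2 % pc) (pvAt grid p.1 p.2)) := by
          unfold pvOkB
          rw [List.all_cons, hclause, Bool.or_true, Bool.true_and]
          rw [show ∀ f g : (Nat × Nat) → Bool, (∀ q, f q = g q) → t.all f = t.all g from
            fun f g h => by simp only [funext h]]
          intro q
          rw [hbuild]
        rw [show pvGoB grid pr pc (p :: t) d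
            = pvGoB grid pr pc t (d.insert (p.1 % pr, p.2 % pc) (pvAt grid p.1 p.2)) by
          simp [pvGoB, hv, hget]]
        rw [ih, hok, hbuild]
      | some u =>
        have hc : d.contains (p.1 % pr, p.2 % pc) = true := by
          by_contra hcf
          rw [(PySem.Dict.get?_eq_none_iff_contains d _).mpr (by simpa using hcf)] at hget
          simp at hget
        have hbuild : pvBuildB grid pr pc (p :: t) d = pvBuildB grid pr pc t d := by
          unfold pvBuildB
          simp only [List.foldl_cons, hv, hc, Bool.not_true, Bool.and_false]
          rw [if_neg Bool.false_ne_true]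
        have hgetD : (pvBuildB grid pr pc (p :: t) d).getD (p.1 % pr, p.2 % pc) 0 = u := by
          rw [hbuild, PySem.Dict.getD_eq_get?_getD,
            pvBuildB_get?_mono grid pr pc t d _ _ hget]
          rfl
        by_cases hu : (u != pvAt grid p.1 p.2) = true
        · have hgo : pvGoB grid pr pc (p :: t) d = none := by
            simp [pvGoB, hv, hget, hu]
          have hclause : ((pvAt grid p.1 p.2 == 0) ||
              ((pvBuildB grid pr pc (p :: t) d).getD (p.1 % pr, p.2 % pc) 0
               == pvAt grid p.1 p.2)) = false := by
            rw [hgetD]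
            simp only [Bool.or_eq_false_iff]
            constructor
            · simpa using hv
            · simpa using hu
          have hok : pvOkB grid pr pc (p :: t) d = false := by
            unfold pvOkB
            rw [List.all_cons]
            unfold pvOkB at hclause
            rw [hclause, Bool.false_and]
          rw [hgo, hok, if_neg (by simp)]
        · have hu' : u = pvAt grid p.1 p.2 := by simpa using hu
          have hgo : pvGoB grid pr pc (p :: t) d = pvGoB grid pr pc t d := by
            simp [pvGoB, hv, hget, hu]
          have hok : pvOkB grid pr pc (p :: t) d = pvOkB grid pr pc t d := by
            unfold pvOkB
            rw [List.all_cons, hgetD]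
            rw [hbuild]
            simp [hu']
          rw [hgo, ih, hok, hbuild]
    · have hv' : (pvAt grid p.1 p.2 != 0) = false := by simpa using hv
      have hbuild : pvBuildB grid pr pc (p :: t) d = pvBuildB grid pr pc t d := by
        unfold pvBuildB
        simp only [List.foldl_cons, hv', Bool.false_and]
        rw [if_neg Bool.false_ne_true]
      have hgo : pvGoB grid pr pc (p :: t) d = pvGoB grid pr pc t d := by
        simp [pvGoB, hv']
      have hok : pvOkB grid pr pc (p :: t) d = pvOkB grid pr pc t d := by
        unfold pvOkB
        rw [List.all_cons, hbuild]
        have h0 : (pvAt grid p.1 p.2 == 0) = true := by simpa using hv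
        rw [h0, Bool.true_or, Bool.true_and]
      rw [hgo, ih, hok, hbuild]

-- B's dictionary looked up = A's reference search
theorem pvFirstB_get? (grid : List (List Int)) (R C pr pc : Nat) (x : Nat × Nat) :
    (pvBuildB grid pr pc (pvCells R C) PySem.Dict.empty).get? x
      = (pvFindRefA grid R C pr pc x).map (fun q => pvAt grid q.1 q.2) := by
  unfold pvFindRefA
  exact pvBuildB_get?_none grid pr pc (pvCells R C) PySem.Dict.empty x (PySem.Dict.get?_empty x)

-- the two validity flags coincide
theorem pvValidA_eq_pvOkB (grid : List (List Int)) (R C pr pc : Nat) :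
    pvValidA grid R C pr pc = pvOkB grid pr pc (pvCells R C) PySem.Dict.empty := by
  unfold pvValidA pvOkB
  rw [Bool.eq_iff_iff]
  simp only [List.all_eq_true]
  refine forall_congr' fun p => forall_congr' fun hp => ?_
  by_cases h0 : pvAt grid p.1 p.2 = 0
  · simp [h0]
  · have hfind : ∃ q, pvFindRefA grid R C pr pc (p.1 % pr, p.2 % pc) = some q := by
      rw [← Option.isSome_iff_exists]
      unfold pvFindRefA
      rw [List.find?_isSome]
      exact ⟨p, hp, by simp [h0]⟩
    obtain ⟨q, hq⟩ := hfind
    rw [hq, PySem.Dict.getD_eq_get?_getD, pvFirstB_get?, hq]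
    simp [h0]

-- A's last-write-wins tile agrees with any class-consistent table g on touched classes
theorem pvTile_lastwins (grid : List (List Int)) (pr pc : Nat) (g : Nat × Nat → Int)
    (l : List (Nat × Nat)) (t : Nat × Nat → Int)
    (hg : ∀ p ∈ l, pvAt grid p.1 p.2 ≠ 0 → pvAt grid p.1 p.2 = g (p.1 % pr, p.2 % pc))
    (x : Nat × Nat) :
    (l.foldl (fun t p =>
        if pvAt grid p.1 p.2 ≠ 0
        then Function.update t (p.1 % pr, p.2 % pc) (pvAt grid p.1 p.2) else t) t) x
      = if l.any (fun q => ((q.1 % pr, q.2 % pc) == x) && (pvAt grid q.1 q.2 != 0))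
        then g x else t x := by
  induction l generalizing t with
  | nil => simp
  | cons p tl ih =>
    simp only [List.foldl_cons, List.any_cons]
    by_cases hv : pvAt grid p.1 p.2 = 0
    · rw [if_neg (by simp [hv])]
      rw [ih t (fun q hq => hg q (List.mem_cons_of_mem p hq))]
      have hp : ((p.1 % pr, p.2 % pc) == x && (pvAt grid p.1 p.2 != 0)) = false := by
        simp [hv]
      simp only [hp, Bool.false_or]
    · rw [if_pos hv]
      rw [ih _ (fun q hq => hg q (List.mem_cons_of_mem p hq))]
      by_cases ha : tl.any (fun q => ((q.1 % pr, q.2 % pc) == x) && (pvAt grid q.1 q.2 != 0)) = true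
      · simp [ha]
      · have ha' : tl.any (fun q => ((q.1 % pr, q.2 % pc) == x) && (pvAt grid q.1 q.2 != 0)) = false := by
          simpa using ha
        simp only [ha', Bool.or_false]
        by_cases hk : (p.1 % pr, p.2 % pc) = x
        · subst hk
          rw [if_neg Bool.false_ne_true, if_pos (by simp [hv])]
          simpa [Function.update] using hg p List.mem_cons_self hv
        · simp [Function.update, hk, hv, Ne.symm hk]

-- under a valid period, A's tile equals B's dictionary lookup everywhere
theorem pvTileA_eq_getD (grid : List (List Int)) (R C pr pc : Nat)
    (h : pvOkB grid pr pc (pvCells R C) PySem.Dict.empty = true) (x : Nat × Nat) :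
    pvTileA grid R C pr pc x
      = (pvBuildB grid pr pc (pvCells R C) PySem.Dict.empty).getD x 0 := by
  have hg : ∀ p ∈ pvCells R C, pvAt grid p.1 p.2 ≠ 0 →
      pvAt grid p.1 p.2
        = (pvBuildB grid pr pc (pvCells R C) PySem.Dict.empty).getD (p.1 % pr, p.2 % pc) 0 := by
    intro p hp hv
    have := (List.all_eq_true.mp (by unfold pvOkB at h; exact h)) p hp
    simp only [Bool.or_eq_true, beq_iff_eq] at this
    rcases this with h0 | he
    · exact absurd h0 hv
    · exact he.symm
  unfold pvTileA
  rw [pvTile_lastwins grid pr pc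
    (fun x => (pvBuildB grid pr pc (pvCells R C) PySem.Dict.empty).getD x 0) (pvCells R C) _ hg x]
  by_cases ha : (pvCells R C).any (fun q => ((q.1 % pr, q.2 % pc) == x) && (pvAt grid q.1 q.2 != 0)) = true
  · rw [ha, if_pos rfl]
  · have ha' : (pvCells R C).any (fun q => ((q.1 % pr, q.2 % pc) == x) && (pvAt grid q.1 q.2 != 0)) = false := by
      simpa using ha
    rw [ha']
    have hf : (pvCells R C).find? (fun q => ((q.1 % pr, q.2 % pc) == x) && (pvAt grid q.1 q.2 != 0)) = none := by
      rw [List.find?_eq_none]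
      intro q hq
      have := (List.any_eq_false.mp ha') q hq
      simp_all
    rw [PySem.Dict.getD_eq_get?_getD, pvFirstB_get?]
    unfold pvFindRefA
    rw [hf]
    simp

-- per candidate period, B's trial (run + fill) returns exactly A's try
theorem pvTry_eq (grid : List (List Int)) (R C minr minc h w pr pc : Nat) :
    pvTryA grid R C minr minc h w pr pc
      = (match pvRunB pr pc (pvNz grid (pvCells R C)) PySem.Dict.empty with
         | some first => some (pvFillB first minr minc h w pr pc)
         | none => none) := by
  unfold pvTryA
  rw [pvValidA_eq_pvOkB, pvRunB_eq_pvGoB, pvGoB_eq]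
  by_cases hv : pvOkB grid pr pc (pvCells R C) PySem.Dict.empty = true
  · have ht : ∀ x, pvTileA grid R C pr pc x
        = (pvBuildB grid pr pc (pvCells R C) PySem.Dict.empty).getD x 0 :=
      pvTileA_eq_getD grid R C pr pc hv
    simp only [hv, if_true, pvFillB, ht]
  · simp only [Bool.not_eq_true] at hv
    simp only [hv, Bool.false_eq_true, if_false]

-- small fold facts for B's running bounding box ------------------------------

-- once min_r is set it never changes
theorem pvFoldFirst_some (xs : List (Nat × Nat)) (a : Nat) :
    xs.foldl (fun o p => if o.isNone then some p.1 else o) (some a) = some a := by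
  induction xs with
  | nil => rfl
  | cons p t ih => simpa using ih

-- the running column minimum is the fold of min over the zero columns
theorem pvFoldOptMin_some (xs : List (Nat × Nat)) (a : Nat) :
    xs.foldl (fun o p => some (match o with
      | none => p.2 | some m => if p.2 < m then p.2 else m)) (some a)
      = some ((xs.map Prod.snd).foldl min a) := by
  induction xs generalizing a with
  | nil => rfl
  | cons p t ih =>
    simp only [List.foldl_cons, List.map_cons]
    rw [show (if p.2 < a then p.2 else a) = min a p.2 from by split <;> omega]
    exact ih _

-- B's running column-maximum step is max
theorem pvFoldMax (xs : List (Nat × Nat)) (a : Nat) :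
    xs.foldl (fun M p => if M < p.2 then p.2 else M) a = (xs.map Prod.snd).foldl max a := by
  induction xs generalizing a with
  | nil => rfl
  | cons p t ih =>
    simp only [List.foldl_cons, List.map_cons]
    rw [show (if a < p.2 then p.2 else a) = max a p.2 from by split <;> omega]
    exact ih _

-- the running column minimum, started, is the fold of min
-- B's running maximum step is max
-- scan order: the first zero row is the minimum of the zero rows
theorem pvFoldMin_of_le (xs : List Nat) (a : Nat) (h : ∀ x ∈ xs, a ≤ x) :
    xs.foldl min a = a := by
  induction xs with
  | nil => rfl
  | cons c t ih =>
    simp only [List.foldl_cons]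
    rw [show min a c = a from by have := h c List.mem_cons_self; omega]
    exact ih (fun x hx => h x (List.mem_cons_of_mem c hx))

-- scan order: the last zero row is the maximum of the zero rows
theorem pvFoldLast (xs : List (Nat × Nat)) (a : Nat)
    (h : List.Pairwise (· ≤ ·) (a :: xs.map Prod.fst)) :
    xs.foldl (fun _ p => p.1) a = (xs.map Prod.fst).foldl max a := by
  induction xs generalizing a with
  | nil => rfl
  | cons p t ih =>
    simp only [List.map_cons] at h
    simp only [List.foldl_cons, List.map_cons]
    rw [show max a p.1 = p.1 from by
      have := (List.pairwise_cons.mp h).1 p.1 List.mem_cons_self; omega]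
    exact ih p.1 h.tail

-- the cells come row by row: their row numbers are nondecreasing
theorem pvCells_rows_mono (R C : Nat) :
    (pvCells R C).Pairwise (fun a b => a.1 ≤ b.1) := by
  unfold pvCells
  rw [List.pairwise_flatMap]
  constructor
  · intro r _
    rw [List.pairwise_map]
    exact List.pairwise_iff_forall_sublist.mpr (fun _ => le_refl r)
  · apply List.Pairwise.imp ?_ (List.pairwise_lt_range)
    intro r r' hrr' x hx y hy
    simp only [List.mem_map] at hx hy
    obtain ⟨_, _, rfl⟩ := hx
    obtain ⟨_, _, rfl⟩ := hy
    exact Nat.le_of_lt hrr'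

-- B's single scan, flattened to one fold over the cell list
theorem pvScanB_eq_cells (grid : List (List Int)) (R C : Nat) :
    pvScanB grid R C
      = (pvCells R C).foldl (fun s p => pvStepB p.1 p.2 (pvAt grid p.1 p.2) s)
          (none, 0, none, 0, []) := by
  unfold pvScanB pvCells
  rw [List.foldl_flatMap]
  simp only [List.foldl_map, pvAt]

-- what the single scan computes, with a generalized accumulator
theorem pvScan_foldl (grid : List (List Int)) (l : List (Nat × Nat))
    (s : Option Nat × Nat × Option Nat × Nat × List (Nat × Nat × Int)) :
    l.foldl (fun s p => pvStepB p.1 p.2 (pvAt grid p.1 p.2) s) s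
      = ((l.filter (fun p => pvAt grid p.1 p.2 == 0)).foldl
           (fun o p => if o.isNone then some p.1 else o) s.1,
         (l.filter (fun p => pvAt grid p.1 p.2 == 0)).foldl (fun _ p => p.1) s.2.1,
         (l.filter (fun p => pvAt grid p.1 p.2 == 0)).foldl
           (fun o p => some (match o with | none => p.2 | some m => if p.2 < m then p.2 else m))
           s.2.2.1,
         (l.filter (fun p => pvAt grid p.1 p.2 == 0)).foldl
           (fun M p => if M < p.2 then p.2 else M) s.2.2.2.1,
         s.2.2.2.2 ++ pvNz grid l) := by
  induction l generalizing s with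
  | nil => simp [pvNz]
  | cons p t ih =>
    obtain ⟨mr, Mr, mc, Mc, nz⟩ := s
    by_cases hv : pvAt grid p.1 p.2 = 0
    · rw [List.foldl_cons, ih]
      simp [pvStepB, hv, pvNz]
    · rw [List.foldl_cons, ih]
      have hnz : pvNz grid (p :: t) = (p.1, p.2, pvAt grid p.1 p.2) :: pvNz grid t := by
        simp [pvNz, hv]
      simp [pvStepB, hv, hnz]

-- the scan when the grid has no zero cell
theorem pvScanB_char_nil (grid : List (List Int)) (R C : Nat)
    (hz : (pvCells R C).filter (fun p => pvAt grid p.1 p.2 == 0) = []) :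
    pvScanB grid R C = (none, 0, none, 0, pvNz grid (pvCells R C)) := by
  rw [pvScanB_eq_cells, pvScan_foldl, hz]
  rfl

-- the scan when the first zero cell is q: B's bounding box = A's min?/max? values
theorem pvScanB_char_cons (grid : List (List Int)) (R C : Nat) (q : Nat × Nat)
    (z' : List (Nat × Nat))
    (hz : (pvCells R C).filter (fun p => pvAt grid p.1 p.2 == 0) = q :: z') :
    pvScanB grid R C
      = (some ((PySem.List.min? ((q :: z').map Prod.fst) (fun x => x)).getD 0),
         (PySem.List.max? ((q :: z').map Prod.fst) (fun x => x)).getD 0,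
         some ((PySem.List.min? ((q :: z').map Prod.snd) (fun x => x)).getD 0),
         (PySem.List.max? ((q :: z').map Prod.snd) (fun x => x)).getD 0,
         pvNz grid (pvCells R C)) := by
  have hpw : List.Pairwise (fun a b => (a : Nat × Nat).1 ≤ b.1) (q :: z') := by
    rw [← hz]
    exact List.Pairwise.sublist (List.filter_sublist) (pvCells_rows_mono R C)
  have hpw' : List.Pairwise (· ≤ ·) (q.1 :: z'.map Prod.fst) := by
    have := List.Pairwise.map Prod.fst (fun {a b} h => h) hpw
    simpa using this
  rw [pvScanB_eq_cells, pvScan_foldl, hz]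
  refine Prod.ext ?_ (Prod.ext ?_ (Prod.ext ?_ (Prod.ext ?_ ?_)))
  · -- min_r: first zero's row = min of the zero rows
    simp only [List.map_cons, PySem.List.min?_id_cons, Option.getD_some]
    have h1 : (z'.map Prod.fst).foldl min q.1 = q.1 :=
      pvFoldMin_of_le _ _ (fun x hx => by
        simp only [List.mem_map] at hx
        obtain ⟨b, hb, rfl⟩ := hx
        exact (List.pairwise_cons.mp hpw).1 b hb)
    rw [h1, List.foldl_cons]
    exact pvFoldFirst_some z' q.1
  · -- max_r: last zero's row = max of the zero rows
    simp only [List.map_cons, PySem.List.max?_id_cons, Option.getD_some]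
    rw [List.foldl_cons]
    exact pvFoldLast z' q.1 hpw'
  · -- min_c: running column minimum = min of the zero columns
    simp only [List.map_cons, PySem.List.min?_id_cons, Option.getD_some]
    rw [List.foldl_cons]
    exact pvFoldOptMin_some z' q.2
  · -- max_c: running column maximum = max of the zero columns
    simp only [List.map_cons, PySem.List.max?_id_cons, Option.getD_some]
    rw [List.foldl_cons, show (if (0 : Nat) < q.2 then q.2 else 0) = q.2 from by split <;> omega]
    exact pvFoldMax z' q.2
  · rfl

-- the pc loop is a findSome? over its range
theorem pvLoopC_eq (nz : List (Nat × Nat × Int)) (minr minc h w pr : Nat) (pcs : List Nat) :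
    pvLoopC nz minr minc h w pr pcs
      = pcs.findSome? (fun pc =>
          match pvRunB pr pc nz PySem.Dict.empty with
          | some first => some (pvFillB first minr minc h w pr pc)
          | none => none) := by
  induction pcs with
  | nil => rfl
  | cons pc rest ih =>
    rw [List.findSome?_cons]
    cases hr : pvRunB pr pc nz PySem.Dict.empty with
    | some first => simp [pvLoopC, hr]
    | none => simpa [pvLoopC, hr] using ih


-- the pr loop is a findSome? over its range
theorem pvLoopR_eq (nz : List (Nat × Nat × Int)) (minr minc h w C : Nat) (prs : List Nat) :
    pvLoopR nz minr minc h w C prs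
      = prs.findSome? (fun pr => pvLoopC nz minr minc h w pr (List.range' 1 (C - 1))) := by
  induction prs with
  | nil => rfl
  | cons pr rest ih =>
    rw [List.findSome?_cons]
    cases hr : pvLoopC nz minr minc h w pr (List.range' 1 (C - 1)) with
    | some out => simp [pvLoopR, hr]
    | none => simpa [pvLoopR, hr] using ih

-- findSome? over a flatMap is the nested findSome?
theorem pvFindSome?_flatMap {α β γ : Type} (l : List α) (f : α → List β) (g : β → Option γ) :
    (l.flatMap f).findSome? g = l.findSome? (fun a => (f a).findSome? g) := by
  induction l with
  | nil => simp
  | cons a t ih =>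
    rw [List.flatMap_cons, List.findSome?_append, List.findSome?_cons]
    cases h : (f a).findSome? g with
    | none => simpa using ih
    | some v => simp

-- B's two loops = A's search over the period pairs
theorem pvLoops_eq (grid : List (List Int)) (R C minr minc h w : Nat) :
    (pvPairs R C).findSome? (fun pp => pvTryA grid R C minr minc h w pp.1 pp.2)
      = pvLoopR (pvNz grid (pvCells R C)) minr minc h w C (List.range' 1 (R - 1)) := by
  have hfun : ∀ pp : Nat × Nat, pvTryA grid R C minr minc h w pp.1 pp.2
      = match pvRunB pp.1 pp.2 (pvNz grid (pvCells R C)) PySem.Dict.empty with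
        | some first => some (pvFillB first minr minc h w pp.1 pp.2)
        | none => none := fun pp => pvTry_eq grid R C minr minc h w pp.1 pp.2
  rw [pvLoopR_eq]
  unfold pvPairs
  rw [pvFindSome?_flatMap]
  congr 1
  funext pr
  rw [List.findSome?_map, pvLoopC_eq]
  congr 1
  funext pc
  exact hfun (pr, pc)

-- ===== VERDICT (by name: the statement is the Claim_ definition above) =====
theorem solve_f9012d9b_spec : Claim_equal_solve_f9012d9b := by
  intro grid _ _
  unfold Spec_solve_f9012d9b
  simp only [solve_f9012d9b, solve_f9012d9b_alt]
  cases hz : (pvCells grid.length (grid.getD 0 []).length).filter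
      (fun p => pvAt grid p.1 p.2 == 0) with
  | nil =>
    rw [pvScanB_char_nil grid _ _ hz]
    rfl
  | cons q z' =>
    rw [pvScanB_char_cons grid _ _ q z' hz]
    simp only [List.isEmpty_cons, Bool.false_eq_true, if_false]
    rw [pvLoops_eq]
    rfl
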